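-- pv_equiv track=rewrite | github.com/pairie-koh/Oracle-Labs-V2 | report.py | format_newswire
-- ===== SOURCE A (Python) =====
-- def format_newswire(briefing):
--     """Format the newswire summary section."""
--     facts = briefing.get("fresh_facts", [])
--     if not facts:
--         return "  No facts available."
--
--     # Count by direction
--     escalation_cats = {"military_pressure", "economic_collapse", "internal_stability"}
--     deescalation_cats = {"diplomatic_signals", "international_response"}
--
--     esc_count = 0
--     deesc_count = 0
--     neutral_count = 0
--
--     for fact in facts:
--         cat = fact.get("indicator_category", "")
--         if cat in escalation_cats:
--             esc_count += 1
--         elif cat in deescalation_cats: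
--             deesc_count += 1
--         else:
--             neutral_count += 1
--
--     lines = [f"  {len(facts)} facts ({esc_count} escalatory, {deesc_count} de-escalatory, {neutral_count} neutral)"]
--
--     # Top claims (first 3, truncated)
--     lines.append("  Top claims:")
--     for fact in facts[:3]:
--         cat = fact.get("indicator_category", "unknown")
--         claim = fact.get("claim", "")
--         if len(claim) > 90:
--             claim = claim[:87] + "..."
--         lines.append(f"    [{cat}] {claim}")
--
--     return "\n".join(lines)
-- ===== SOURCE B (Python) =====
-- ESCALATION = ("military_pressure", "economic_collapse", "internal_stability")
-- DEESCALATION = ("diplomatic_signals", "international_response")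
--
--
-- def format_newswire(briefing):
--     """Format the newswire summary section."""
--     facts = briefing.get("fresh_facts", [])
--     if not facts:
--         return "  No facts available."
--
--     # Staged passes: extract the category list once, then count each named
--     # category with its own scan; neutral is derived by subtraction.
--     cats = [fact.get("indicator_category", "") for fact in facts]
--     esc_count = sum(cats.count(c) for c in ESCALATION)
--     deesc_count = sum(cats.count(c) for c in DEESCALATION)
--     neutral_count = len(facts) - esc_count - deesc_count
--
--     header = (f"  {len(facts)} facts ({esc_count} escalatory, "
--               f"{deesc_count} de-escalatory, {neutral_count} neutral)")
--     top = [
--         f"    [{fact.get('indicator_category', 'unknown')}] {_clip(fact.get('claim', ''))}"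
--         for fact in facts[:3]
--     ]
--     return "\n".join([header, "  Top claims:"] + top)
--
--
-- def _clip(claim):
--     if len(claim) > 90:
--         return claim[:87] + "..."
--     return claim
-- ===== Notes on version B (the rewrite author's own statement) =====
-- stated objective: alternative
-- what changed: A's single three-accumulator classification loop is replaced by staged passes: extract the category list once, then count each of the five named categories with its own list.count scan (no per-fact branching at all), with neutral derived by subtraction from len(facts); top-claims lines come from a comprehension over facts[:3] with a clip helper instead of appending in a loop.
import Mathlib
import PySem

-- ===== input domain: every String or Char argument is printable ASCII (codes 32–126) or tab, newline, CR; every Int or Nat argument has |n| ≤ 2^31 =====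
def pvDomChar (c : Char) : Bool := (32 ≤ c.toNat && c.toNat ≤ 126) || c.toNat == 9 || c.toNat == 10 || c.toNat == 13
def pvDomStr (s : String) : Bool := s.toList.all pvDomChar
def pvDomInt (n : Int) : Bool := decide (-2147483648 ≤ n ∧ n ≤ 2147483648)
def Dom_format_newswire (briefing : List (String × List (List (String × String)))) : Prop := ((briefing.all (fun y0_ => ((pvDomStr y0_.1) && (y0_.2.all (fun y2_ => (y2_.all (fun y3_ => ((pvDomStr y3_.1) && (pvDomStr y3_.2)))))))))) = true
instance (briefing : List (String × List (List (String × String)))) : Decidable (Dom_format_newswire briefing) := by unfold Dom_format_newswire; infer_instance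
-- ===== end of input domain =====

-- B replaces A's single three-accumulator classification loop by staged passes: it extracts
-- the category list once, counts each of the five named categories with its own scan, and
-- derives neutral by subtraction; the top-claims lines come from a map over the slice
-- (objective: alternative decomposition, same cost).

-- ===== PORT A =====
def format_newswire (briefing : List (String × List (List (String × String)))) : String :=
  let facts := (PySem.Dict.mk briefing).getD "fresh_facts" []
  if facts.isEmpty then "  No facts available."
  else
    let escalation_cats : PySem.Set String :=
      PySem.Set.ofList ["military_pressure", "economic_collapse", "internal_stability"]
    let deescalation_cats : PySem.Set String :=
      PySem.Set.ofList ["diplomatic_signals", "international_response"]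
    let c := facts.foldl (fun (t : Int × Int × Int) fact =>
        let cat := (PySem.Dict.mk fact).getD "indicator_category" ""
        if cat ∈ escalation_cats then (t.1 + 1, t.2.1, t.2.2)
        else if cat ∈ deescalation_cats then (t.1, t.2.1 + 1, t.2.2)
        else (t.1, t.2.1, t.2.2 + 1)) (0, 0, 0)
    let lines : List String :=
      ["  " ++ PySem.Int.toStr facts.length ++ " facts (" ++ PySem.Int.toStr c.1 ++
        " escalatory, " ++ PySem.Int.toStr c.2.1 ++ " de-escalatory, " ++
        PySem.Int.toStr c.2.2 ++ " neutral)"]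
    let lines := lines ++ ["  Top claims:"]
    let lines := (PySem.List.slice facts none (some 3)).foldl (fun ls fact =>
        let cat := (PySem.Dict.mk fact).getD "indicator_category" "unknown"
        let claim := (PySem.Dict.mk fact).getD "claim" ""
        let claim := if PySem.Str.len claim > 90
                     then PySem.Str.slice claim none (some 87) ++ "..." else claim
        ls ++ ["    [" ++ cat ++ "] " ++ claim]) lines
    PySem.Str.join "\n" lines

-- ===== PORT B =====
def pvEscL : List String := ["military_pressure", "economic_collapse", "internal_stability"]
def pvDeescL : List String := ["diplomatic_signals", "international_response"]

def pvClip (claim : String) : String :=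
  if PySem.Str.len claim > 90 then PySem.Str.slice claim none (some 87) ++ "..." else claim

def format_newswire_alt (briefing : List (String × List (List (String × String)))) : String :=
  let facts := (PySem.Dict.mk briefing).getD "fresh_facts" []
  if facts.isEmpty then "  No facts available."
  else
    let cats := facts.map (fun fact => (PySem.Dict.mk fact).getD "indicator_category" "")
    let esc_count : Int := (pvEscL.map (fun c => (PySem.List.count cats c : Int))).sum
    let deesc_count : Int := (pvDeescL.map (fun c => (PySem.List.count cats c : Int))).sum
    let neutral_count := (facts.length : Int) - esc_count - deesc_count
    let header := "  " ++ PySem.Int.toStr facts.length ++ " facts (" ++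
      PySem.Int.toStr esc_count ++ " escalatory, " ++ PySem.Int.toStr deesc_count ++
      " de-escalatory, " ++ PySem.Int.toStr neutral_count ++ " neutral)"
    let top := (PySem.List.slice facts none (some 3)).map (fun fact =>
        "    [" ++ (PySem.Dict.mk fact).getD "indicator_category" "unknown" ++ "] " ++
          pvClip ((PySem.Dict.mk fact).getD "claim" ""))
    PySem.Str.join "\n" (header :: "  Top claims:" :: top)

-- ===== PRECONDITION & SPEC =====
def Spec_format_newswire (briefing : List (String × List (List (String × String)))) (out : String) : Prop := out = format_newswire_alt briefing
instance (briefing : List (String × List (List (String × String)))) (out : String) : Decidable (Spec_format_newswire briefing out) := by unfold Spec_format_newswire; infer_instance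

-- ===== CLAIM (what is proved, stated in full; the proofs are below) =====
def Claim_equal_format_newswire : Prop := ∀ (briefing : List (String × List (List (String × String)))), Dom_format_newswire briefing → Spec_format_newswire briefing (format_newswire briefing)

-- ===== LEMMAS AND PROOFS =====

-- the category of a fact, with default dflt
def pvCat (dflt : String) (fact : List (String × String)) : String :=
  (PySem.Dict.mk fact).getD "indicator_category" dflt

lemma pv_disjoint (s : String) (h : s ∈ pvDeescL) : s ∉ pvEscL := by
  simp [pvDeescL] at h
  rcases h with h | h <;> simp [h, pvEscL]

-- A's classification loop computes the two countP's and the remainder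
lemma pv_loopA (facts : List (List (String × String))) (e d n : Int) :
    facts.foldl (fun (t : Int × Int × Int) fact =>
        let cat := pvCat "" fact
        if cat ∈ pvEscL then (t.1 + 1, t.2.1, t.2.2)
        else if cat ∈ pvDeescL then (t.1, t.2.1 + 1, t.2.2)
        else (t.1, t.2.1, t.2.2 + 1)) (e, d, n)
    = (e + (facts.countP (fun f => decide (pvCat "" f ∈ pvEscL)) : Int),
       d + (facts.countP (fun f => decide (pvCat "" f ∈ pvDeescL)) : Int),
       n + (facts.length : Int)
         - (facts.countP (fun f => decide (pvCat "" f ∈ pvEscL)) : Int)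
         - (facts.countP (fun f => decide (pvCat "" f ∈ pvDeescL)) : Int)) := by
  induction facts generalizing e d n with
  | nil => simp
  | cons f t ih =>
    simp only [List.foldl_cons, List.countP_cons, List.length_cons]
    by_cases hE : pvCat "" f ∈ pvEscL
    · have hD : pvCat "" f ∉ pvDeescL := fun hd => pv_disjoint _ hd hE
      simp only [hE, if_pos, hD, decide_true, decide_false]
      rw [ih]
      simp only [Prod.mk.injEq]
      refine ⟨by push_cast; ring, by push_cast; ring, by push_cast; ring⟩
    · by_cases hD : pvCat "" f ∈ pvDeescL
      · simp only [hE, hD, if_pos, decide_true, decide_false]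
        rw [ih]
        simp only [Prod.mk.injEq]
        refine ⟨by push_cast; ring, by push_cast; ring, by push_cast; ring⟩
      · simp only [hE, hD, decide_false]
        rw [ih]
        simp only [Prod.mk.injEq]
        refine ⟨by push_cast; ring, by push_cast; ring, by push_cast; ring⟩

-- sum of counts of distinct literal categories = countP of membership
lemma pv_count_esc (l : List String) :
    l.count "military_pressure" + l.count "economic_collapse" + l.count "internal_stability"
      = l.countP (fun c => decide (c ∈ pvEscL)) := by
  induction l with
  | nil => simp
  | cons x t ih =>
    simp only [List.count_cons, List.countP_cons]
    by_cases h : x ∈ pvEscL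
    · have h' : x = "military_pressure" ∨ x = "economic_collapse" ∨ x = "internal_stability" := by
        simpa [pvEscL] using h
      rw [← ih]
      rcases h' with rfl | rfl | rfl <;> simp [pvEscL] <;> omega
    · have h1 : x ≠ "military_pressure" := by rintro rfl; exact h (by simp [pvEscL])
      have h2 : x ≠ "economic_collapse" := by rintro rfl; exact h (by simp [pvEscL])
      have h3 : x ≠ "internal_stability" := by rintro rfl; exact h (by simp [pvEscL])
      simp [h, h1, h2, h3, ih]

lemma pv_count_deesc (l : List String) :
    l.count "diplomatic_signals" + l.count "international_response"
      = l.countP (fun c => decide (c ∈ pvDeescL)) := by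
  induction l with
  | nil => simp
  | cons x t ih =>
    simp only [List.count_cons, List.countP_cons]
    by_cases h : x ∈ pvDeescL
    · have h' : x = "diplomatic_signals" ∨ x = "international_response" := by
        simpa [pvDeescL] using h
      rw [← ih]
      rcases h' with rfl | rfl <;> simp [pvDeescL] <;> omega
    · have h1 : x ≠ "diplomatic_signals" := by rintro rfl; exact h (by simp [pvDeescL])
      have h2 : x ≠ "international_response" := by rintro rfl; exact h (by simp [pvDeescL])
      simp [h, h1, h2, ih]

-- ===== VERDICT (by name: the statement is the Claim_ definition above) =====
theorem format_newswire_spec : Claim_equal_format_newswire := by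
  intro briefing _
  show format_newswire briefing = format_newswire_alt briefing
  unfold format_newswire format_newswire_alt
  set facts := (PySem.Dict.mk briefing).getD "fresh_facts" []
  by_cases hf : facts.isEmpty
  · simp [hf]
  · simp only [hf, Bool.false_eq_true, if_false, PySem.Set.mem_ofList]
    rw [PySem.List.foldl_append_singleton_eq_map]
    simp only [List.cons_append, List.nil_append]
    apply congrArg
    simp only [List.mem_cons, List.not_mem_nil, or_false]
    have hA := pv_loopA facts 0 0 0
    simp only [pvCat, pvEscL, pvDeescL, List.mem_cons, List.not_mem_nil, or_false] at hA
    rw [hA]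
    have hcntE : (facts.countP (fun f => decide (pvCat "" f ∈ pvEscL)) : Int)
        = ((facts.map (pvCat "")).count "military_pressure"
          + (facts.map (pvCat "")).count "economic_collapse"
          + (facts.map (pvCat "")).count "internal_stability" : ℕ) := by
      have hN := pv_count_esc (facts.map (pvCat ""))
      rw [List.countP_map] at hN
      simp only [Function.comp_def] at hN
      exact_mod_cast hN.symm
    have hcntD : (facts.countP (fun f => decide (pvCat "" f ∈ pvDeescL)) : Int)
        = ((facts.map (pvCat "")).count "diplomatic_signals"
          + (facts.map (pvCat "")).count "international_response" : ℕ) := by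
      have hN := pv_count_deesc (facts.map (pvCat ""))
      rw [List.countP_map] at hN
      simp only [Function.comp_def] at hN
      exact_mod_cast hN.symm
    simp only [pvCat, pvEscL, pvDeescL, List.mem_cons, List.not_mem_nil, or_false]
      at hcntE hcntD
    simp only [pvEscL, pvDeescL, List.map_cons, List.map_nil, List.sum_cons, List.sum_nil,
      PySem.List.count, pvClip]
    have hfun : pvCat "" = fun fact => (PySem.Dict.mk fact).getD "indicator_category" "" := by
      funext fact; rfl
    rw [hcntE, hcntD, hfun]
    push_cast
    ring_nf
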